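-- pv_equiv track=rewrite | github.com/Merkul8/post_site | main.py | get_validated_form
-- ===== SOURCE A (Python) =====
-- def get_validated_form(fields_dict: dict, form_dict: dict) -> str:
--     result = None
--     flag = 0
--     for k, _ in fields_dict.items():
--         if k in form_dict and form_dict[k] == fields_dict[k]:
--             flag += 1
--     if len(form_dict) == flag:
--         result = fields_dict['name']
--     return result
-- ===== SOURCE B (Python) =====
-- _MISSING = object()
--
-- def get_validated_form(fields_dict: dict, form_dict: dict) -> str:
--     for k, v in form_dict.items():
--         if fields_dict.get(k, _MISSING) != v:
--             return None
--     return fields_dict['name']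
-- ===== Notes on version B (the rewrite author's own statement) =====
-- stated objective: simpler
-- what changed: Replaces A's counter over fields_dict plus length-vs-counter comparison with a short-circuiting scan of form_dict's items that returns None at the first unmatched entry and fields_dict['name'] when all entries match.
import Mathlib
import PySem

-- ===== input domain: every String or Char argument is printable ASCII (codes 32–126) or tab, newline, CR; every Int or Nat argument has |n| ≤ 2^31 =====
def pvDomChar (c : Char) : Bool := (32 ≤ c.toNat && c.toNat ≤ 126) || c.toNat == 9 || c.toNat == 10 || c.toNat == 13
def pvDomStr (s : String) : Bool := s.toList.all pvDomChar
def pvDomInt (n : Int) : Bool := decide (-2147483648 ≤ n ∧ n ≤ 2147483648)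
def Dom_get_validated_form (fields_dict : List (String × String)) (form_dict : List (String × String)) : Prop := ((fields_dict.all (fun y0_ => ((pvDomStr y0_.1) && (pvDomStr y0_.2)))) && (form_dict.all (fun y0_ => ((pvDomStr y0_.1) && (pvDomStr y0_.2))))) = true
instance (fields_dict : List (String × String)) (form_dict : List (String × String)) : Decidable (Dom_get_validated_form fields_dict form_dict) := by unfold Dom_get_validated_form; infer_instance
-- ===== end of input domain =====

-- B replaces A's counter-and-length-comparison with a short-circuiting structural recursion over
-- form_dict's items (objective: simpler). Equivalence is about the RETURN value; no argument is mutated.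

-- ===== PORT A =====
def get_validated_form (fields_dict : List (String × String)) (form_dict : List (String × String)) : Option String :=
  let fd := PySem.Dict.mk fields_dict
  let md := PySem.Dict.mk form_dict
  let flag : Int := fields_dict.foldl
    (fun flag kv => if md.contains kv.1 && (md.get? kv.1 == fd.get? kv.1) then flag + 1 else flag) 0
  if (md.size : Int) = flag then fd.get? "name" else none

-- ===== PORT B =====
-- Source B's loop over form_dict as structural recursion: fail fast on a mismatch,
-- look up 'name' only when the items are exhausted (KeyError there is excluded by Pre_).
def pvCheck (fd : PySem.Dict String String) (items : List (String × String)) : Option String :=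
  match items with
  | [] => fd.get? "name"
  | (k, v) :: rest =>
    match fd.get? k with
    | some w => if w == v then pvCheck fd rest else none
    | none => none

def get_validated_form_alt (fields_dict : List (String × String)) (form_dict : List (String × String)) : Option String :=
  pvCheck (PySem.Dict.mk fields_dict) form_dict

-- ===== PRECONDITION & SPEC =====
-- Pre_ excludes association lists with duplicate keys (those do not represent Python dicts) and the
-- inputs on which both Pythons raise KeyError: every form entry matched but fields_dict lacks 'name'.
def Pre_get_validated_form (fields_dict : List (String × String)) (form_dict : List (String × String)) : Prop :=
  (fields_dict.map Prod.fst).Nodup ∧ (form_dict.map Prod.fst).Nodup ∧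
  ((∀ kv ∈ form_dict, kv ∈ fields_dict) → "name" ∈ fields_dict.map Prod.fst)
instance (fields_dict : List (String × String)) (form_dict : List (String × String)) : Decidable (Pre_get_validated_form fields_dict form_dict) := by unfold Pre_get_validated_form; infer_instance
def pvWitness_get_validated_form : (List (String × String)) × (List (String × String)) := ([("name", "x"), ("a", "1")], [("a", "1")])

def Spec_get_validated_form (fields_dict : List (String × String)) (form_dict : List (String × String)) (out : Option String) : Prop := out = get_validated_form_alt fields_dict form_dict
instance (fields_dict : List (String × String)) (form_dict : List (String × String)) (out : Option String) : Decidable (Spec_get_validated_form fields_dict form_dict out) := by unfold Spec_get_validated_form; infer_instance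

-- ===== CLAIM (what is proved, stated in full; the proofs are below) =====
def Claim_equal_get_validated_form : Prop := ∀ (fields_dict : List (String × String)) (form_dict : List (String × String)), Dom_get_validated_form fields_dict form_dict → Pre_get_validated_form fields_dict form_dict → Spec_get_validated_form fields_dict form_dict (get_validated_form fields_dict form_dict)

-- ===== LEMMAS AND PROOFS =====

-- counting common pairs is symmetric for key-nodup association lists
lemma countP_mem_comm (l₁ l₂ : List (String × String))
    (h₁ : (l₁.map Prod.fst).Nodup) (h₂ : (l₂.map Prod.fst).Nodup) :
    l₁.countP (· ∈ l₂) = l₂.countP (· ∈ l₁) := by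
  have n₁ : l₁.Nodup := h₁.of_map
  have n₂ : l₂.Nodup := h₂.of_map
  have : (l₁.filter (· ∈ l₂)).Perm (l₂.filter (· ∈ l₁)) := by
    rw [List.perm_ext_iff_of_nodup (n₁.filter _) (n₂.filter _)]
    intro a
    simp only [List.mem_filter, decide_eq_true_eq]
    exact ⟨fun ⟨x, y⟩ => ⟨y, x⟩, fun ⟨x, y⟩ => ⟨y, x⟩⟩
  simpa [List.countP_eq_length_filter] using this.length_eq

lemma get?_mk_eq_some_iff (l : List (String × String)) (h : (l.map Prod.fst).Nodup)
    (kv : String × String) : ((PySem.Dict.mk l).get? kv.1 = some kv.2) ↔ kv ∈ l := by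
  have := PySem.Dict.get?_eq_some_iff_mem_items (d := PySem.Dict.mk l) (k := kv.1) (v := kv.2) h
  simpa using this

-- B's recursion computes: 'name'-lookup if every remaining pair is an entry of fields, else none
lemma pvCheck_eq (fields : List (String × String)) (hf : (fields.map Prod.fst).Nodup)
    (items : List (String × String)) :
    pvCheck (PySem.Dict.mk fields) items =
      if items.all (fun kv => decide (kv ∈ fields)) then (PySem.Dict.mk fields).get? "name"
      else none := by
  induction items with
  | nil => simp [pvCheck]
  | cons kv rest ih =>
    obtain ⟨k, v⟩ := kv
    by_cases hmem : (k, v) ∈ fields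
    · have hfd : (PySem.Dict.mk fields).get? k = some v :=
        (get?_mk_eq_some_iff fields hf (k, v)).mpr hmem
      simp only [pvCheck, hfd, beq_self_eq_true, if_true, ih, List.all_cons]
      have hdec : decide ((k, v) ∈ fields) = true := by simp [hmem]
      simp only [hdec, Bool.true_and]
    · rcases hg : (PySem.Dict.mk fields).get? k with _ | w
      · simp [pvCheck, hg, hmem]
      · have hne : (w == v) = false := by
          simp only [beq_eq_false_iff_ne, ne_eq]
          rintro rfl
          exact hmem ((get?_mk_eq_some_iff fields hf (k, w)).mp hg)
        simp [pvCheck, hg, hne, hmem]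

theorem get_validated_form_spec_aux (fields_dict form_dict : List (String × String))
    (hpre : Pre_get_validated_form fields_dict form_dict) :
    get_validated_form fields_dict form_dict = get_validated_form_alt fields_dict form_dict := by
  obtain ⟨hf, hm, -⟩ := hpre
  unfold get_validated_form get_validated_form_alt
  dsimp only
  rw [PySem.List.foldl_if_add_one, zero_add, pvCheck_eq fields_dict hf form_dict]
  -- predicate of A's count, rewritten to pair membership in form_dict
  have hcount : fields_dict.countP
      (fun kv => (PySem.Dict.mk form_dict).contains kv.1 &&
        ((PySem.Dict.mk form_dict).get? kv.1 == (PySem.Dict.mk fields_dict).get? kv.1)) =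
      fields_dict.countP (· ∈ form_dict) := by
    apply List.countP_congr
    intro kv hkv
    have hfd : (PySem.Dict.mk fields_dict).get? kv.1 = some kv.2 :=
      (get?_mk_eq_some_iff fields_dict hf kv).mpr hkv
    rw [hfd]
    by_cases hmem : kv ∈ form_dict
    · have hmd : (PySem.Dict.mk form_dict).get? kv.1 = some kv.2 :=
        (get?_mk_eq_some_iff form_dict hm kv).mpr hmem
      rw [PySem.Dict.contains_eq_isSome_get?, hmd]
      simp [hmem]
    · have hmd : ((PySem.Dict.mk form_dict).get? kv.1 == some kv.2) = false := by
        simpa using fun h => hmem ((get?_mk_eq_some_iff form_dict hm kv).mp h)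
      simp [hmd, hmem]
  rw [hcount, countP_mem_comm fields_dict form_dict hf hm]
  -- the counter reaches the dict's size iff every form entry is matched
  have hsize : (PySem.Dict.mk form_dict).size = form_dict.length := rfl
  have hiff : ((form_dict.length : Int) = (form_dict.countP (fun kv => decide (kv ∈ fields_dict)) : Int)) ↔
      form_dict.all (fun kv => decide (kv ∈ fields_dict)) = true := by
    rw [Int.natCast_inj, eq_comm, List.countP_eq_length, List.all_eq_true]
  rw [hsize]
  by_cases hc : form_dict.all (fun kv => decide (kv ∈ fields_dict)) = true
  · rw [if_pos (hiff.mpr hc), if_pos hc]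
  · rw [if_neg (fun h => hc (hiff.mp h)), if_neg hc]

-- ===== VERDICT (by name: the statement is the Claim_ definition above) =====
theorem get_validated_form_spec : Claim_equal_get_validated_form := by
  intro fields_dict form_dict _ hpre
  exact get_validated_form_spec_aux fields_dict form_dict hpre
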